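-- pv_equiv track=rewrite | github.com/ai-pharm-AU/GOLDEN-GNN | stages/04_metrics/code/work_alpha_gnn_20260212/scripts/run_gnn_enrichment.py | build_gene_to_clusters
-- ===== SOURCE A (Python) =====
-- from collections import Counter, defaultdict
--
-- def build_gene_to_clusters(
--     cluster_genes: dict[str, dict[int, set[str]]]
-- ) -> dict[str, dict[str, list[int]]]:
--     out: dict[str, dict[str, list[int]]] = {}
--     for threshold, cluster_map in cluster_genes.items():
--         gene_map: dict[str, list[int]] = defaultdict(list)
--         for cluster, genes in cluster_map.items():
--             for gene in genes:
--                 gene_map[gene].append(cluster)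
--         for gene in gene_map:
--             gene_map[gene].sort()
--         out[threshold] = dict(gene_map)
--     return out
-- ===== SOURCE B (Python) =====
-- def build_gene_to_clusters(cluster_genes):
--     out = {}
--     for threshold, cluster_map in cluster_genes.items():
--         gene_map = {gene: [] for genes in cluster_map.values() for gene in genes}
--         for cluster in sorted(cluster_map):
--             for gene in cluster_map[cluster]:
--                 gene_map[gene].append(cluster)
--         out[threshold] = gene_map
--     return out
-- ===== Notes on version B (the rewrite author's own statement) =====
-- stated objective: alternative
-- what changed: Instead of appending clusters in dict order and then sorting every gene's list, B pre-seeds the gene map via a comprehension and consumes the cluster keys in one ascending sorted order, so each gene's list is built already sorted and the per-gene sort loop disappears.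
import Mathlib
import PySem

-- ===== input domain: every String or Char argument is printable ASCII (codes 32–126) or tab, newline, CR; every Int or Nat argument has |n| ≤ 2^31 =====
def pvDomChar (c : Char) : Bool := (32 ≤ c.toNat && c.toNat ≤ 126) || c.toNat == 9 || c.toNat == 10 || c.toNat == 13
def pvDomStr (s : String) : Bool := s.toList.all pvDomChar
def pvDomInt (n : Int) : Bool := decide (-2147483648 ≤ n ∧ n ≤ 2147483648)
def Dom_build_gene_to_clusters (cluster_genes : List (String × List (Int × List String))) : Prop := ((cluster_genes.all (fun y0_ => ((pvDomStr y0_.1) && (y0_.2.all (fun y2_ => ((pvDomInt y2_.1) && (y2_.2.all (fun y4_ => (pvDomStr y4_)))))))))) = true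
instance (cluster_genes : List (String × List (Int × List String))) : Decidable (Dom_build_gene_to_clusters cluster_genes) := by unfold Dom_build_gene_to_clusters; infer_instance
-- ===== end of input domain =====

-- B replaces A's append-then-sort-each-gene inversion by pre-seeding the gene map and consuming the
-- cluster keys in one ascending sorted pass, so every gene's list is built already sorted (alternative
-- decomposition, no speed claim). Equivalence of RETURN values; neither version mutates its argument.

-- ===== PORT A =====
-- gene_map[gene].append(cluster) on a defaultdict(list), at the association-list level:
-- update the first entry with that key, or append a fresh (gene, [cluster]) entry.
def gmBump (m : List (String × List Int)) (g : String) (c : Int) : List (String × List Int) :=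
  match m with
  | [] => [(g, [c])]
  | q :: t => if q.1 == g then (q.1, q.2 ++ [c]) :: t else q :: gmBump t g c

-- the body of A's outer loop for one threshold: build gene_map, then sort each gene's list in place
def pyInnerA (cm : List (Int × List String)) : List (String × List Int) :=
  (cm.foldl (fun gm e => e.2.foldl (fun gm' g => gmBump gm' g e.1) gm) []).map
    (fun q => (q.1, PySem.List.sorted q.2 (fun x => x) false))

def build_gene_to_clusters (cluster_genes : List (String × List (Int × List String))) : List (String × List (String × List Int)) :=
  (cluster_genes.foldl
    (fun (out : PySem.Dict String (List (String × List Int))) p => out.insert p.1 (pyInnerA p.2))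
    PySem.Dict.empty).items

-- ===== PORT B =====
-- gene_map[gene].append(cluster) where the key is known to exist (pre-seeded): update in place
def gmApp (m : List (String × List Int)) (g : String) (c : Int) : List (String × List Int) :=
  m.map (fun q => if q.1 == g then (q.1, q.2 ++ [c]) else q)

-- cluster_map[cluster]: first-match association-list lookup ([] is unreachable: c is one of the keys)
def lookupGenes : List (Int × List String) → Int → List String
  | [], _ => []
  | e :: t, c => if e.1 == c then e.2 else lookupGenes t c

-- the body of B's outer loop: seed {gene: [] ...} (a dict comprehension = ordered dedup of the genes),
-- then append each cluster in ascending key order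
def pyInnerB (cm : List (Int × List String)) : List (String × List Int) :=
  (PySem.List.sorted (cm.map Prod.fst) (fun x => x) false).foldl
    (fun gm c => (lookupGenes cm c).foldl (fun gm' g => gmApp gm' g c) gm)
    ((PySem.List.dedup (cm.flatMap Prod.snd)).map (fun g => (g, ([] : List Int))))

def build_gene_to_clusters_alt (cluster_genes : List (String × List (Int × List String))) : List (String × List (String × List Int)) :=
  (cluster_genes.foldl
    (fun (out : PySem.Dict String (List (String × List Int))) p => out.insert p.1 (pyInnerB p.2))
    PySem.Dict.empty).items

-- ===== PRECONDITION & SPEC =====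
-- Pre_ excludes association lists in which some inner cluster map has duplicate Int keys: such a list
-- does not represent a Python dict (dict keys are unique), so neither program can ever receive it.
def Pre_build_gene_to_clusters (cluster_genes : List (String × List (Int × List String))) : Prop :=
  ∀ p ∈ cluster_genes, (p.2.map Prod.fst).Nodup
instance (cluster_genes : List (String × List (Int × List String))) : Decidable (Pre_build_gene_to_clusters cluster_genes) := by unfold Pre_build_gene_to_clusters; infer_instance

def pvWitness_build_gene_to_clusters : (List (String × List (Int × List String))) :=
  [("0.5", [(2, ["g1", "g2"]), (1, ["g2"])]), ("0.9", [])]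

def Spec_build_gene_to_clusters (cluster_genes : List (String × List (Int × List String))) (out : List (String × List (String × List Int))) : Prop := out = build_gene_to_clusters_alt cluster_genes
instance (cluster_genes : List (String × List (Int × List String))) (out : List (String × List (String × List Int))) : Decidable (Spec_build_gene_to_clusters cluster_genes out) := by unfold Spec_build_gene_to_clusters; infer_instance

-- ===== CLAIM (what is proved, stated in full; the proofs are below) =====
def Claim_equal_build_gene_to_clusters : Prop := ∀ (cluster_genes : List (String × List (Int × List String))), Dom_build_gene_to_clusters cluster_genes → Pre_build_gene_to_clusters cluster_genes → Spec_build_gene_to_clusters cluster_genes (build_gene_to_clusters cluster_genes)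

-- ===== LEMMAS AND PROOFS =====

-- clusters recorded for gene g by a list of (gene, cluster) events, in event order
def pvVals (g : String) (ps : List (String × Int)) : List Int :=
  (ps.filter (fun p => p.1 == g)).map Prod.snd

-- the (gene, cluster) event stream of A's nested loops
def pvPairsA (cm : List (Int × List String)) : List (String × Int) :=
  cm.flatMap (fun e => e.2.map (fun g => (g, e.1)))

-- the (gene, cluster) event stream of B's nested loops
def pvPairsB (cm : List (Int × List String)) : List (String × Int) :=
  (PySem.List.sorted (cm.map Prod.fst) (fun x => x) false).flatMap
    (fun c => (lookupGenes cm c).map (fun g => (g, c)))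

-- a nested pair of foldls is a foldl over the flattened event stream
theorem pvFoldFlatten {α β M : Type} (step : M → β → M) (f : α → List β) :
    ∀ (l : List α) (m : M),
      l.foldl (fun acc a => (f a).foldl step acc) m = (l.flatMap f).foldl step m := by
  intro l
  induction l with
  | nil => intro m; rfl
  | cons a t ih => intro m; simp [List.flatMap_cons, List.foldl_append, ih]

theorem pvAppFold :
    ∀ (ps : List (String × Int)) (m : List (String × List Int)),
      ps.foldl (fun m' p => gmApp m' p.1 p.2) m
        = m.map (fun q => (q.1, q.2 ++ pvVals q.1 ps)) := by
  intro ps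
  induction ps with
  | nil => intro m; simp [pvVals]
  | cons p t ih =>
    intro m
    rw [List.foldl_cons, ih, gmApp, List.map_map]
    apply List.map_congr_left
    intro q _
    by_cases h : q.1 = p.1
    · simp [Function.comp, pvVals, h]
    · simp [Function.comp, pvVals, h, Ne.symm h]

theorem pvGmBump_not_mem (m : List (String × List Int)) (g : String) (c : Int)
    (h : g ∉ m.map Prod.fst) : gmBump m g c = m ++ [(g, [c])] := by
  induction m with
  | nil => rfl
  | cons q t ih =>
    simp only [List.map_cons, List.mem_cons, not_or] at h
    simp [gmBump, Ne.symm h.1, ih h.2]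

theorem pvGmBump_mem (m : List (String × List Int)) (g : String) (c : Int)
    (hnd : (m.map Prod.fst).Nodup) (h : g ∈ m.map Prod.fst) :
    gmBump m g c = m.map (fun q => if q.1 == g then (q.1, q.2 ++ [c]) else q) := by
  induction m with
  | nil => simp at h
  | cons q t ih =>
    simp only [List.map_cons, List.nodup_cons] at hnd
    simp only [List.map_cons, List.mem_cons] at h
    by_cases hq : q.1 = g
    · have hnt : ∀ r ∈ t, (r.1 == g) = false := by
        intro r hr
        apply beq_eq_false_iff_ne.mpr
        intro he
        exact hnd.1 (hq ▸ he ▸ List.mem_map_of_mem hr)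
      have ht : t.map (fun q => if (q.1 == g) = true then (q.1, q.2 ++ [c]) else q) = t :=
        (List.map_congr_left fun r hr => by simp [hnt r hr]).trans (List.map_id t)
      rw [List.map_cons, ht]
      simp [gmBump, hq]
    · have hg : g ∈ t.map Prod.fst := h.resolve_left (fun he => hq he.symm)
      simp [gmBump, hq, ih hnd.2 hg]

theorem pvDedupSnoc (l : List String) (x : String) :
    PySem.List.dedup (l ++ [x]) = if x ∈ l then PySem.List.dedup l else PySem.List.dedup l ++ [x] := by
  simp only [PySem.List.dedup_eq_ofList, PySem.Set.ofList_append, PySem.Set.update_cons,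
    PySem.Set.update_nil, PySem.Set.add]
  by_cases h : x ∈ l <;> simp [h, PySem.Set.mem_ofList]

theorem pvValsSnoc (g : String) (ps : List (String × Int)) (p : String × Int) :
    pvVals g (ps ++ [p]) = pvVals g ps ++ (if p.1 == g then [p.2] else []) := by
  by_cases h : p.1 = g <;> simp [pvVals, List.filter_append, h]

theorem pvValsNil (g : String) (ps : List (String × Int)) (h : g ∉ ps.map Prod.fst) :
    pvVals g ps = [] := by
  have : ps.filter (fun p => p.1 == g) = [] := by
    apply List.filter_eq_nil_iff.mpr
    intro p hp hb
    exact h (beq_iff_eq.mp hb ▸ List.mem_map_of_mem hp)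
  simp [pvVals, this]

theorem pvBumpFold :
    ∀ (ps : List (String × Int)),
      ps.foldl (fun m' p => gmBump m' p.1 p.2) []
        = (PySem.List.dedup (ps.map Prod.fst)).map (fun g => (g, pvVals g ps)) := by
  intro ps
  induction ps using List.reverseRecOn with
  | nil => simp [pysem]
  | append_singleton ps p ih =>
    rw [List.foldl_append, List.foldl_cons, List.foldl_nil, ih]
    simp only [List.map_append, List.map_cons, List.map_nil]
    rw [pvDedupSnoc]
    have hkeys : ((PySem.List.dedup (ps.map Prod.fst)).map (fun g => (g, pvVals g ps))).map Prod.fst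
        = PySem.List.dedup (ps.map Prod.fst) := by
      rw [List.map_map]; exact (List.map_congr_left fun g _ => rfl).trans (List.map_id _)
    by_cases h : p.1 ∈ ps.map Prod.fst
    · rw [pvGmBump_mem _ _ _ (by rw [hkeys]; exact PySem.List.nodup_dedup _)
        (by rw [hkeys]; exact (PySem.List.mem_dedup _ _).mpr h)]
      simp only [h, if_true, List.map_map]
      apply List.map_congr_left
      intro g _
      by_cases hg : g = p.1 <;> simp [Function.comp, hg, pvValsSnoc, Ne.symm]
    · rw [pvGmBump_not_mem _ _ _ (by rw [hkeys]; exact fun hc => h ((PySem.List.mem_dedup _ _).mp hc))]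
      simp only [h, if_false, List.map_append, List.map_cons, List.map_nil]
      congr 1
      · apply List.map_congr_left
        intro g hg
        have hne : p.1 ≠ g := fun he => h (he ▸ (PySem.List.mem_dedup _ _).mp hg)
        simp [pvValsSnoc, hne]
      · simp [pvValsSnoc, pvValsNil p.1 ps h]

theorem pvLookupNe (cm : List (Int × List String)) (e : Int × List String) (c : Int)
    (h : e.1 ≠ c) : lookupGenes (e :: cm) c = lookupGenes cm c := by
  simp [lookupGenes, h]

theorem pvLookupSelf (cm : List (Int × List String)) (h : (cm.map Prod.fst).Nodup) :
    (cm.map Prod.fst).map (fun c => (c, lookupGenes cm c)) = cm := by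
  induction cm with
  | nil => rfl
  | cons e t ih =>
    simp only [List.map_cons, List.nodup_cons] at h ⊢
    have h1 : (e.1, lookupGenes (e :: t) e.1) = e := by simp [lookupGenes]
    have h2 : (t.map Prod.fst).map (fun c => (c, lookupGenes (e :: t) c)) = t := by
      rw [List.map_congr_left (fun c hc => by
        rw [pvLookupNe t e c (fun he => h.1 (he ▸ hc))])]
      exact ih h.2
    rw [h1, h2]

theorem pvValsAppend (g : String) (xs ys : List (String × Int)) :
    pvVals g (xs ++ ys) = pvVals g xs ++ pvVals g ys := by
  simp [pvVals, List.filter_append]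

theorem pvValsFlatMap {α : Type} (g : String) (l : List α) (f : α → List (String × Int)) :
    pvVals g (l.flatMap f) = l.flatMap (fun a => pvVals g (f a)) := by
  induction l with
  | nil => simp [pvVals]
  | cons a t ih => simp [List.flatMap_cons, pvValsAppend, ih]

theorem pvValsMapPair (g : String) (l : List String) (c : Int) :
    pvVals g (l.map (fun g' => (g', c))) = (l.filter (fun x => x == g)).map (fun _ => c) := by
  induction l with
  | nil => rfl
  | cons x t ih =>
    by_cases h : x = g <;> simp [pvVals, h] <;> simpa [pvVals] using ih

theorem pvValsBFlat (cm : List (Int × List String)) (g : String) :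
    pvVals g (pvPairsB cm)
      = ((PySem.List.sorted (cm.map Prod.fst) (fun x => x) false).map
          (fun c => (c, lookupGenes cm c))).flatMap
          (fun e => (e.2.filter (fun x => x == g)).map (fun _ => e.1)) := by
  rw [pvPairsB, pvValsFlatMap, List.flatMap_map]
  simp only [pvValsMapPair]

theorem pvValsPerm (cm : List (Int × List String)) (h : (cm.map Prod.fst).Nodup) (g : String) :
    (pvVals g (pvPairsB cm)).Perm (pvVals g (pvPairsA cm)) := by
  rw [pvValsBFlat]
  have hA : pvVals g (pvPairsA cm)
      = cm.flatMap (fun e => (e.2.filter (fun x => x == g)).map (fun _ => e.1)) := by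
    rw [pvPairsA, pvValsFlatMap]
    simp only [pvValsMapPair]
  rw [hA]
  have hperm : ((PySem.List.sorted (cm.map Prod.fst) (fun x => x) false).map
      (fun c => (c, lookupGenes cm c))).Perm cm := by
    have h1 := (PySem.List.sorted_perm (cm.map Prod.fst) (fun x => x) false).map
      (fun c => (c, lookupGenes cm c))
    rwa [pvLookupSelf cm h] at h1
  exact hperm.flatMap_right _

theorem pvValsSorted (cm : List (Int × List String)) (g : String) :
    (pvVals g (pvPairsB cm)).Pairwise (· ≤ ·) := by
  rw [pvPairsB, pvValsFlatMap]
  apply List.pairwise_flatMap.mpr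
  refine ⟨fun c _ => ?_, ?_⟩
  · rw [pvValsMapPair]
    exact List.pairwise_map.mpr (List.pairwise_of_forall fun _ _ => le_rfl)
  · have hs := PySem.List.sorted_pairwise (cm.map Prod.fst) (fun x => x)
    refine hs.imp ?_
    intro a b hab x hx y hy
    rw [pvValsMapPair] at hx hy
    obtain ⟨_, _, rfl⟩ := List.mem_map.mp hx
    obtain ⟨_, _, rfl⟩ := List.mem_map.mp hy
    exact hab

theorem pvKeysA (cm : List (Int × List String)) :
    (pvPairsA cm).map Prod.fst = cm.flatMap Prod.snd := by
  rw [pvPairsA, List.map_flatMap]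
  simp [Function.comp_def]

theorem pvInnerEq (cm : List (Int × List String)) (h : (cm.map Prod.fst).Nodup) :
    pyInnerA cm = pyInnerB cm := by
  have hA : pyInnerA cm
      = (PySem.List.dedup (cm.flatMap Prod.snd)).map
          (fun g => (g, PySem.List.sorted (pvVals g (pvPairsA cm)) (fun x => x) false)) := by
    rw [pyInnerA]
    have hstep : (fun (gm : List (String × List Int)) (e : Int × List String) =>
        e.2.foldl (fun gm' g => gmBump gm' g e.1) gm)
        = (fun acc e => ((e.2.map (fun g => (g, e.1))).foldl (fun m' p => gmBump m' p.1 p.2) acc)) := by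
      funext gm e
      rw [List.foldl_map]
    rw [hstep, pvFoldFlatten, ← pvPairsA, pvBumpFold, pvKeysA, List.map_map]
    simp [Function.comp_def]
  have hB : pyInnerB cm
      = (PySem.List.dedup (cm.flatMap Prod.snd)).map
          (fun g => (g, pvVals g (pvPairsB cm))) := by
    rw [pyInnerB]
    have hstep : (fun (gm : List (String × List Int)) (c : Int) =>
        (lookupGenes cm c).foldl (fun gm' g => gmApp gm' g c) gm)
        = (fun acc c => (((lookupGenes cm c).map (fun g => (g, c))).foldl
            (fun m' p => gmApp m' p.1 p.2) acc)) := by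
      funext gm c
      rw [List.foldl_map]
    rw [hstep, pvFoldFlatten, ← pvPairsB, pvAppFold, List.map_map]
    simp [Function.comp]
  rw [hA, hB]
  apply List.map_congr_left
  intro g _
  have hs := PySem.List.sorted_id_eq_of_perm_of_pairwise _ _ (pvValsPerm cm h g) (pvValsSorted cm g)
  exact congrArg (fun v => (g, v)) hs

-- ===== VERDICT (by name: the statement is the Claim_ definition above) =====
theorem build_gene_to_clusters_spec : Claim_equal_build_gene_to_clusters := by
  intro cg _ hpre
  unfold Spec_build_gene_to_clusters build_gene_to_clusters build_gene_to_clusters_alt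
  have : ∀ (d : PySem.Dict String (List (String × List Int))) (l : List (String × List (Int × List String))),
      (∀ p ∈ l, (p.2.map Prod.fst).Nodup) →
      l.foldl (fun out p => out.insert p.1 (pyInnerA p.2)) d
        = l.foldl (fun out p => out.insert p.1 (pyInnerB p.2)) d := by
    intro d l
    induction l generalizing d with
    | nil => intro _; rfl
    | cons a t ih =>
      intro hl
      simp only [List.foldl_cons]
      rw [pvInnerEq a.2 (hl a (by simp))]
      exact ih _ (fun p hp => hl p (by simp [hp]))
  rw [this _ _ hpre]
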